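-- pv_equiv track=rewrite | github.com/Amin-py69/python-test | ex1.py | expand_binomial
-- ===== SOURCE A (Python) =====
-- def binomial_coefficient(n, k):
--     if k == 0 or k == n:
--         return 1
--     return binomial_coefficient(n - 1, k - 1) + binomial_coefficient(n - 1, k)
--
-- def expand_binomial(n):
--     result = ""
--     for i in range(n + 1):
--         coefficient = binomial_coefficient(n, i)
--         if coefficient > 1:
--             result += str(coefficient)
--         if n - i > 0:
--             result += "x"
--             if n - i > 1:
--                 result += "^{" + str(n - i) + "}"
--         if i > 0:
--             result += "y"
--             if i > 1:
--                 result += "^" + str(i)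
--         if i < n:
--             result += "+"
--     return result
-- ===== SOURCE B (Python) =====
-- def expand_binomial(n):
--     # Coefficients via the multiplicative running-product formula (O(n^2) digits work)
--     # instead of A's exponential naive recursion; terms collected and joined once.
--     terms = []
--     c = 1
--     for i in range(n + 1):
--         e = n - i
--         xpart = "" if e <= 0 else ("x" if e == 1 else "x^{" + str(e) + "}")
--         ypart = "" if i <= 0 else ("y" if i == 1 else "y^" + str(i))
--         terms.append((str(c) if c > 1 else "") + xpart + ypart)
--         c = c * e // (i + 1)
--     return "+".join(terms)
-- ===== Notes on version B (the rewrite author's own statement) =====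
-- stated objective: alternative
-- what changed: A recomputes every binomial coefficient from scratch with the naive exponential Pascal recursion and grows the string by repeated concatenation; B keeps one running coefficient updated by the exact multiplicative formula and joins the collected terms once (asymptotically cheaper, but a timing run could not confirm a speed-up since A does not finish on larger inputs).
-- outside the precondition, e.g. on expand_binomial(10000): A raises RecursionError
import Mathlib
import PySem

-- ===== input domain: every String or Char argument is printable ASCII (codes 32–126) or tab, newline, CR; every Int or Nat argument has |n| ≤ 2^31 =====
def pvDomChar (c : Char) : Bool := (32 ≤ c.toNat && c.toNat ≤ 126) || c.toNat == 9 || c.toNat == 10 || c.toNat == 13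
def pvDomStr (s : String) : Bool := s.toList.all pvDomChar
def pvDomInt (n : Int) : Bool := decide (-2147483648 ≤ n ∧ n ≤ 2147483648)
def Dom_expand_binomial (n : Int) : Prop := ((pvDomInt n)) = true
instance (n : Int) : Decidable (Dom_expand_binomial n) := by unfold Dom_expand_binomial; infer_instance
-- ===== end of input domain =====

-- B replaces A's exponential naive-recursion binomial coefficients by the multiplicative
-- running-product formula and joins the terms once; same output string for every n.

-- ===== PORT A =====
-- binomial_coefficient(n, k); the Nat `fuel` only makes the recursion structural
-- (A only calls it with 0 ≤ k ≤ n and fuel = n.toNat suffices — the 0 branch is never reached there).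
def pvBinCoef : Nat → Int → Int → Int
  | fuel, n, k =>
    if k = 0 ∨ k = n then 1
    else match fuel with
      | 0 => 0
      | f + 1 => pvBinCoef f (n - 1) (k - 1) + pvBinCoef f (n - 1) k

-- one iteration of A's loop body (result is the accumulated string as List Char)
def pvStepA (n : Int) (result : List Char) (i : Int) : List Char :=
  let coefficient := pvBinCoef n.toNat n i
  let result := if coefficient > 1 then result ++ PySem.Int.toChars coefficient else result
  let result :=
    if n - i > 0 then
      let result := result ++ ['x']
      if n - i > 1 then (result ++ ('^' :: '{' :: PySem.Int.toChars (n - i))) ++ ['}'] else result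
    else result
  let result :=
    if i > 0 then
      let result := result ++ ['y']
      if i > 1 then result ++ ('^' :: PySem.Int.toChars i) else result
    else result
  if i < n then result ++ ['+'] else result

def expand_binomial (n : Int) : String :=
  String.mk ((PySem.List.pyRange 0 (n + 1) 1).foldl (pvStepA n) [])

-- ===== PORT B =====
-- one iteration of B's loop body: state = (terms so far, running coefficient c)
def pvStepB (n : Int) (st : List (List Char) × Int) (i : Int) : List (List Char) × Int :=
  let c := st.2
  let e := n - i
  let xpart : List Char :=
    if e ≤ 0 then [] else if e = 1 then ['x'] else 'x' :: '^' :: '{' :: (PySem.Int.toChars e ++ ['}'])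
  let ypart : List Char :=
    if i ≤ 0 then [] else if i = 1 then ['y'] else 'y' :: '^' :: PySem.Int.toChars i
  (st.1 ++ [(if c > 1 then PySem.Int.toChars c else []) ++ xpart ++ ypart],
   PySem.Int.floordiv (c * e) (i + 1))

def expand_binomial_alt (n : Int) : String :=
  let st := (PySem.List.pyRange 0 (n + 1) 1).foldl (pvStepB n) ([], 1)
  String.mk (PySem.Chars.join ['+'] st.1)

-- ===== PRECONDITION & SPEC =====
-- Pre_ excludes only the huge n on which Python A RAISES RecursionError: binomial_coefficient
-- recurses to depth n, which exceeds the interpreter's recursion limit there; the bound keeps a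
-- safety margin below that limit (an excluded example is cited in claim.json). A returns no value outside Pre_.
def Pre_expand_binomial (n : Int) : Prop := n ≤ 9000
instance (n : Int) : Decidable (Pre_expand_binomial n) := by unfold Pre_expand_binomial; infer_instance
def pvWitness_expand_binomial : Int := (5)

def Spec_expand_binomial (n : Int) (out : String) : Prop := out = expand_binomial_alt n
instance (n : Int) (out : String) : Decidable (Spec_expand_binomial n out) := by unfold Spec_expand_binomial; infer_instance

-- ===== CLAIM (what is proved, stated in full; the proofs are below) =====
def Claim_equal_expand_binomial : Prop := ∀ (n : Int), Dom_expand_binomial n → Pre_expand_binomial n → Spec_expand_binomial n (expand_binomial n)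

-- ===== LEMMAS AND PROOFS =====

-- the i-th term of the expansion, with the true binomial coefficient
def pvTerm (n i : Int) : List Char :=
  (if ((Nat.choose n.toNat i.toNat : Int)) > 1 then PySem.Int.toChars ((Nat.choose n.toNat i.toNat : Int)) else []) ++
  (if n - i ≤ 0 then [] else if n - i = 1 then ['x'] else 'x' :: '^' :: '{' :: (PySem.Int.toChars (n - i) ++ ['}'])) ++
  (if i ≤ 0 then [] else if i = 1 then ['y'] else 'y' :: '^' :: PySem.Int.toChars i)

-- A's recursive helper computes Nat.choose when called inside its intended domain
lemma pvBinCoef_eq (fuel : Nat) : ∀ (n k : Int), 0 ≤ k → k ≤ n → n ≤ (fuel : Int) →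
    pvBinCoef fuel n k = (Nat.choose n.toNat k.toNat : Int) := by
  induction fuel with
  | zero =>
    intro n k hk hkn hn
    have hn0 : n = 0 := le_antisymm (by exact_mod_cast hn) (le_trans hk hkn)
    have hk0 : k = 0 := le_antisymm (hn0 ▸ hkn) hk
    subst hn0; subst hk0
    simp [pvBinCoef]
  | succ f ih =>
    intro n k hk hkn hn
    by_cases h : k = 0 ∨ k = n
    · rcases h with h | h
      · subst h; simp [pvBinCoef]
      · subst h
        simp [pvBinCoef]
    · push_neg at h
      obtain ⟨hk0, hkn'⟩ := h
      have hk1 : 1 ≤ k := lt_of_le_of_ne hk (Ne.symm hk0)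
      have hklt : k < n := lt_of_le_of_ne hkn hkn'
      have h1 : pvBinCoef f (n - 1) (k - 1) = (Nat.choose (n-1).toNat (k-1).toNat : Int) :=
        ih (n - 1) (k - 1) (by omega) (by omega) (by omega)
      have h2 : pvBinCoef f (n - 1) k = (Nat.choose (n-1).toNat k.toNat : Int) :=
        ih (n - 1) k hk (by omega) (by omega)
      have hstep : pvBinCoef (f + 1) n k = pvBinCoef f (n - 1) (k - 1) + pvBinCoef f (n - 1) k := by
        rw [pvBinCoef]
        simp [hk0, hkn']
      rw [hstep, h1, h2]
      have hN : n.toNat = (n - 1).toNat + 1 := by omega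
      have hK : k.toNat = (k - 1).toNat + 1 := by omega
      have hK2 : k.toNat = (k - 1).toNat + 1 := hK
      rw [hN, hK]
      have : ((n - 1).toNat + 1).choose ((k - 1).toNat + 1)
          = (n - 1).toNat.choose (k - 1).toNat + (n - 1).toNat.choose ((k - 1).toNat + 1) :=
        Nat.choose_succ_succ _ _
      rw [this]
      have : (k - 1).toNat + 1 = k.toNat := by omega
      rw [this]
      push_cast
      ring

-- A's loop body produces exactly pvTerm plus a '+' separator when i < n
set_option maxHeartbeats 2000000 in
lemma pvStepA_eq (n i : Int) (acc : List Char) (h0 : 0 ≤ i) (hn : i ≤ n) :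
    pvStepA n acc i = acc ++ pvTerm n i ++ (if i < n then ['+'] else []) := by
  have hc : pvBinCoef n.toNat n i = (Nat.choose n.toNat i.toNat : Int) :=
    pvBinCoef_eq n.toNat n i h0 hn (by omega)
  simp only [pvStepA, pvTerm]
  rw [hc]
  split_ifs <;> first | omega | simp [List.append_assoc]

-- B's loop body appends exactly pvTerm when its running coefficient is Nat.choose n i,
-- and updates the coefficient to Nat.choose n (i+1) (multiplicative formula; exact division)
lemma pvCoef_step (n i : Int) (h0 : 0 ≤ i) (hn : i ≤ n) :
    PySem.Int.floordiv ((Nat.choose n.toNat i.toNat : Int) * (n - i)) (i + 1)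
      = (Nat.choose n.toNat (i.toNat + 1) : Int) := by
  have he : n - i = ((n.toNat - i.toNat : Nat) : Int) := by omega
  have hi1 : i + 1 = ((i.toNat + 1 : Nat) : Int) := by omega
  rw [he, hi1]
  have : (Nat.choose n.toNat i.toNat : Int) * ((n.toNat - i.toNat : Nat) : Int)
      = ((Nat.choose n.toNat i.toNat * (n.toNat - i.toNat) : Nat) : Int) := by push_cast; ring
  rw [this, PySem.Int.floordiv_natCast]
  congr 1
  rw [← Nat.choose_succ_right_eq]
  exact Nat.mul_div_cancel (Nat.choose n.toNat (i.toNat + 1)) (by omega)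

lemma pvStepB_eq (n i : Int) (ts : List (List Char)) (h0 : 0 ≤ i) (hn : i ≤ n) :
    pvStepB n (ts, (Nat.choose n.toNat i.toNat : Int)) i
      = (ts ++ [pvTerm n i], (Nat.choose n.toNat (i.toNat + 1) : Int)) := by
  simp only [pvStepB, pvTerm]
  rw [pvCoef_step n i h0 hn]

-- B's fold, from any start index a with the correct running coefficient
lemma pvFoldB (n : Int) (hn0 : 0 ≤ n) : ∀ (m : Nat) (a : Int) (ts : List (List Char)), 0 ≤ a → a ≤ n + 1 →
    m = (n + 1 - a).toNat →
    (PySem.List.pyRange a (n + 1) 1).foldl (pvStepB n) (ts, (Nat.choose n.toNat a.toNat : Int))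
      = (ts ++ (PySem.List.pyRange a (n + 1) 1).map (pvTerm n), (Nat.choose n.toNat (n.toNat + 1) : Int)) := by
  intro m
  induction m with
  | zero =>
    intro a ts h0 hle hm
    have ha : a = n + 1 := by omega
    have h1 : (n + 1).toNat = n.toNat + 1 := by omega
    rw [ha, PySem.List.pyRange_one_eq_nil (le_refl _), h1]
    simp
  | succ m ih =>
    intro a ts h0 hle hm
    have halt : a < n + 1 := by omega
    rw [PySem.List.pyRange_one_cons halt]
    simp only [List.foldl_cons, List.map_cons]
    rw [pvStepB_eq n a ts h0 (by omega)]
    have hcast : (a + 1).toNat = a.toNat + 1 := by omega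
    have := ih (a + 1) (ts ++ [pvTerm n a]) (by omega) (by omega) (by omega)
    rw [hcast] at this
    rw [this]
    simp

-- A's fold equals the '+'-joined term list, from any start index a ≤ n
lemma pvFoldA (n : Int) : ∀ (m : Nat) (a : Int) (acc : List Char), 0 ≤ a → a ≤ n →
    m = (n - a).toNat →
    (PySem.List.pyRange a (n + 1) 1).foldl (pvStepA n) acc
      = acc ++ PySem.Chars.join ['+'] ((PySem.List.pyRange a (n + 1) 1).map (pvTerm n)) := by
  intro m
  induction m with
  | zero =>
    intro a acc h0 hle hm
    rw [PySem.List.pyRange_one_cons (show a < n + 1 by omega),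
        PySem.List.pyRange_one_eq_nil (show n + 1 ≤ a + 1 by omega)]
    simp only [List.foldl_cons, List.foldl_nil, List.map_cons, List.map_nil,
      PySem.Chars.join_singleton]
    rw [pvStepA_eq n a acc h0 hle, if_neg (show ¬ a < n by omega)]
    simp
  | succ m ih =>
    intro a acc h0 hle hm
    have halt : a < n + 1 := by omega
    rw [PySem.List.pyRange_one_cons halt]
    simp only [List.foldl_cons, List.map_cons]
    rw [pvStepA_eq n a acc h0 (by omega)]
    have hlt : a < n := by omega
    rw [if_pos hlt]
    rw [ih (a + 1) (acc ++ pvTerm n a ++ ['+']) (by omega) (by omega) (by omega)]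
    have hne : PySem.List.pyRange (a + 1) (n + 1) 1 ≠ [] := by
      rw [PySem.List.pyRange_one_cons (by omega : a + 1 < n + 1)]
      simp
    obtain ⟨t, rest, hrw⟩ : ∃ t rest, (PySem.List.pyRange (a + 1) (n + 1) 1).map (pvTerm n) = t :: rest := by
      cases hR : PySem.List.pyRange (a + 1) (n + 1) 1 with
      | nil => exact absurd hR hne
      | cons x xs => exact ⟨pvTerm n x, xs.map (pvTerm n), by simp⟩
    rw [hrw, PySem.Chars.join_cons_cons]
    simp

-- ===== VERDICT (by name: the statement is the Claim_ definition above) =====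
theorem expand_binomial_spec : Claim_equal_expand_binomial := by
  intro n _ _
  unfold Spec_expand_binomial expand_binomial expand_binomial_alt
  by_cases hn : 0 ≤ n
  · rw [pvFoldA n (n - 0).toNat 0 [] (le_refl 0) hn rfl]
    have h0 : (Nat.choose n.toNat (0 : Int).toNat : Int) = 1 := by simp
    have := pvFoldB n hn (n + 1 - 0).toNat 0 [] (le_refl 0) (by omega) rfl
    rw [h0] at this
    rw [this]
    simp
  · rw [PySem.List.pyRange_one_eq_nil (by omega : n + 1 ≤ 0)]
    simp [PySem.Chars.join_nil]
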